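-- pv_equiv track=rewrite | github.com/opsmill/infrahub | python_sdk/infrahub_sdk/utils.py | base16encode
-- ===== SOURCE A (Python) =====
-- def base16encode(number: int) -> str:
--     if not isinstance(number, (int)):
--         raise TypeError("number must be an integer")
--     is_negative = number < 0
--     number = abs(number)
--
--     alphabet = "0123456789abcdef"
--     base16 = ""
--
--     while number:
--         number, i = divmod(number, 16)
--         base16 = alphabet[i] + base16
--     if is_negative:
--         base16 = "-" + base16
--
--     return base16 or alphabet[0]
-- ===== SOURCE B (Python) =====
-- def base16encode(number: int) -> str:
--     if not isinstance(number, (int)):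
--         raise TypeError("number must be an integer")
--     if number < 0:
--         return "-" + base16encode(-number)
--     alphabet = "0123456789abcdef"
--     if number < 16:
--         return alphabet[number]
--     return base16encode(number // 16) + alphabet[number % 16]
-- ===== Notes on version B (the rewrite author's own statement) =====
-- stated objective: alternative
-- what changed: Replaces the iterative divmod loop that prepends digits to an accumulator string with a direct recursion on the hex digits (base case number<16, recursive case on number//16), negatives handled by one recursive call on -number.
import Mathlib
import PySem

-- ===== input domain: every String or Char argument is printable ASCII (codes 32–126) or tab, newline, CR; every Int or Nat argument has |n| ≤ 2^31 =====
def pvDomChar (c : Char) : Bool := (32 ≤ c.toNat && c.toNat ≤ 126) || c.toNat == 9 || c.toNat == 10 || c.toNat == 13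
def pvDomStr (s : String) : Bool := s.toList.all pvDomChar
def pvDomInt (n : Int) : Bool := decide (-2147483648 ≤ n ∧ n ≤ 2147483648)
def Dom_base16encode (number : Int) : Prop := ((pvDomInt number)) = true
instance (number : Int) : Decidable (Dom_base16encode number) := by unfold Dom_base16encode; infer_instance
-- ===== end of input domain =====

-- B replaces A's iterative divmod/prepend loop by a direct recursion on the hex digits
-- (same cost; objective: alternative decomposition). Return values proved equal for all Int.


-- ===== PORT A =====
-- alphabet[i] for i = n % 16 (always in range 0..15, so getD is exact here)
def pyHexDigitA (i : Nat) : String :=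
  String.ofList [("0123456789abcdef".toList).getD i '0']

-- the 'while number:' loop: number, i = divmod(number,16); base16 = alphabet[i] + base16
def base16loopA (n : Nat) (base16 : String) : String :=
  if n = 0 then base16
  else base16loopA (n / 16) (pyHexDigitA (n % 16) ++ base16)
decreasing_by exact Nat.div_lt_self (Nat.pos_of_ne_zero (by assumption)) (by norm_num)

def base16encode (number : Int) : String :=
  let isNegative := number < 0
  let n := number.natAbs          -- number = abs(number)
  let base16 := base16loopA n ""
  let base16 := if isNegative then "-" ++ base16 else base16
  if base16 = "" then "0" else base16   -- return base16 or alphabet[0]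

-- ===== PORT B =====
def pyHexDigitB (i : Nat) : String :=
  String.ofList [("0123456789abcdef".toList).getD i '0']

def base16natB (n : Nat) : String :=
  if n < 16 then pyHexDigitB n
  else base16natB (n / 16) ++ pyHexDigitB (n % 16)
decreasing_by exact Nat.div_lt_self (by omega) (by norm_num)

def base16encode_alt (number : Int) : String :=
  if number < 0 then "-" ++ base16natB number.natAbs
  else base16natB number.natAbs

-- ===== PRECONDITION & SPEC =====
def Spec_base16encode (number : Int) (out : String) : Prop := out = base16encode_alt number
instance (number : Int) (out : String) : Decidable (Spec_base16encode number out) := by unfold Spec_base16encode; infer_instance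

-- ===== CLAIM (what is proved, stated in full; the proofs are below) =====
def Claim_equal_base16encode : Prop := ∀ (number : Int), Dom_base16encode number → Spec_base16encode number (base16encode number)

-- ===== LEMMAS AND PROOFS =====
theorem base16loopA_eq (n : Nat) : ∀ (acc : String), n ≠ 0 →
    base16loopA n acc = base16natB n ++ acc := by
  induction n using Nat.strong_induction_on with
  | _ n ih =>
    intro acc hn
    rw [base16loopA, if_neg hn]
    by_cases h16 : n < 16
    · have hdiv : n / 16 = 0 := Nat.div_eq_of_lt h16
      rw [hdiv, base16loopA, if_pos rfl, base16natB, if_pos h16, Nat.mod_eq_of_lt h16]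
      rfl
    · have hdivne : n / 16 ≠ 0 := by
        intro h; exact h16 (Nat.lt_of_div_eq_zero (by norm_num) h)
      rw [ih (n / 16) (Nat.div_lt_self (Nat.pos_of_ne_zero hn) (by norm_num)) _ hdivne]
      conv_rhs => rw [base16natB, if_neg h16]
      simp [pyHexDigitA, pyHexDigitB, String.append_assoc]

theorem ofList_singleton_ne_empty (c : Char) : String.ofList [c] ≠ "" := by
  intro h
  have := congrArg String.length h
  simp at this

theorem base16natB_ne_empty (n : Nat) : base16natB n ≠ "" := by
  rw [base16natB]
  split
  · exact ofList_singleton_ne_empty _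
  · intro h
    have := congrArg String.length h
    simp [pyHexDigitB] at this

-- ===== VERDICT (by name: the statement is the Claim_ definition above) =====
theorem base16encode_spec : Claim_equal_base16encode := by
  intro number _
  unfold Spec_base16encode base16encode base16encode_alt
  by_cases hneg : number < 0
  · have hne : number.natAbs ≠ 0 := by
      simp [Int.natAbs_eq_zero]; omega
    simp only [hneg, if_pos, base16loopA_eq _ "" hne]
    have : ("-" ++ (base16natB number.natAbs ++ "") : String) ≠ "" := by
      intro h
      have := congrArg String.toList h
      simp at this
    simp
  · simp only [hneg, if_false]
    by_cases h0 : number.natAbs = 0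
    · rw [h0]
      simp [base16loopA, base16natB, pyHexDigitB]
    · rw [base16loopA_eq _ "" h0]
      have h1 : (base16natB number.natAbs ++ "" : String) = base16natB number.natAbs := by
        simp
      rw [h1, if_neg (base16natB_ne_empty _)]
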